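-- pv_equiv track=rewrite | github.com/alaineman/drlcarsim-paper | functions.py | float_to_e
-- ===== SOURCE A (Python) =====
-- def float_to_e(f):
--     s = str(int(f))
--     output = ""
--     count = 0
--     for i in range(len(s)):
--         if int(s[i]) != 0:
--             output += count * "0" + s[i]
--             count = 0
--         else:
--             count += 1
--     output += "e" + f"{count}"
--     return output
-- ===== SOURCE B (Python) =====
-- def float_to_e(f):
--     s = str(int(f))
--     kept = s.rstrip("0")
--     return kept + "e" + str(len(s) - len(kept))
-- ===== Notes on version B (the rewrite author's own statement) =====
-- stated objective: simpler
-- what changed: A's character-by-character forward pass with a buffered zero-run counter is replaced by stripping the trailing zeros in one step and appending their count; Pre_ excludes negative inputs, on which A raises ValueError (int() applied to the '-' character) while B returns the stripped value.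
import Mathlib
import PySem

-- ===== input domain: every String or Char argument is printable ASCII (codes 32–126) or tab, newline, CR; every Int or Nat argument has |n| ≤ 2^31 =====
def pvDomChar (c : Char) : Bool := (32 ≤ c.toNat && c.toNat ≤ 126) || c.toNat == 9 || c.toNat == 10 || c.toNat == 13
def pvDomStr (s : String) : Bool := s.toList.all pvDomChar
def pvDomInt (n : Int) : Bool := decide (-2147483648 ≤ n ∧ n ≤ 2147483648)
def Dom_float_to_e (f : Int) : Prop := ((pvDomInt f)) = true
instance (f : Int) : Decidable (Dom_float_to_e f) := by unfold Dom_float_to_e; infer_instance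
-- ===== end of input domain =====

-- B replaces A's buffered forward pass by one rstrip of the trailing zeros plus their count (objective: simpler).

-- ===== PORT A =====
-- int(s[i]) of A; none (ValueError, e.g. on '-') defaulted — such inputs are outside Pre_
def pvDigitVal (c : Char) : Int := (PySem.Int.ofChars? [c]).getD 0

def pvStepA (st : String × Nat) (c : Char) : String × Nat :=
  if pvDigitVal c ≠ 0 then (st.1 ++ String.ofList (List.replicate st.2 '0') ++ String.ofList [c], 0)
  else (st.1, st.2 + 1)

def float_to_e (f : Int) : String :=
  let s := PySem.Int.toStr f
  let r := (PySem.List.pyRange 0 (PySem.Str.len s) 1).foldl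
    (fun st i => pvStepA st (PySem.List.pyGetD s.toList i ' ')) ("", 0)
  r.1 ++ "e" ++ PySem.Int.toStr (r.2 : Int)

-- ===== PORT B =====
def float_to_e_alt (f : Int) : String :=
  let s := PySem.Int.toStr f
  -- s.rstrip("0") ported by hand as reverse/dropWhile/reverse; exact, the strip set being the single char '0'
  let kept := String.ofList ((s.toList.reverse.dropWhile (· == '0')).reverse)
  kept ++ "e" ++ PySem.Int.toStr ((s.toList.length - kept.toList.length : Nat) : Int)

-- ===== PRECONDITION & SPEC =====
-- Pre_ excludes negative inputs, on which A raises ValueError (int applied to the '-' sign character)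
def Pre_float_to_e (f : Int) : Prop := 0 ≤ f
instance (f : Int) : Decidable (Pre_float_to_e f) := by unfold Pre_float_to_e; infer_instance
def pvWitness_float_to_e : Int := (1200300)

def Spec_float_to_e (f : Int) (out : String) : Prop := out = float_to_e_alt f
instance (f : Int) (out : String) : Decidable (Spec_float_to_e f out) := by unfold Spec_float_to_e; infer_instance

-- ===== CLAIM (what is proved, stated in full; the proofs are below) =====
def Claim_equal_float_to_e : Prop := ∀ (f : Int), Dom_float_to_e f → Pre_float_to_e f → Spec_float_to_e f (float_to_e f)

-- ===== LEMMAS AND PROOFS =====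

def pvDIGITS : List Char := ['0','1','2','3','4','5','6','7','8','9']

lemma pv_digitChar_mem (m : Nat) (h : m < 10) : Nat.digitChar m ∈ pvDIGITS := by
  interval_cases m <;> decide

lemma pv_toDigitsCore_mem (fuel n : Nat) (acc : List Char)
    (hacc : ∀ c ∈ acc, c ∈ pvDIGITS) :
    ∀ c ∈ Nat.toDigitsCore 10 fuel n acc, c ∈ pvDIGITS := by
  induction fuel generalizing n acc with
  | zero => simpa [Nat.toDigitsCore] using hacc
  | succ fuel ih =>
      intro c hc
      simp only [Nat.toDigitsCore] at hc
      split at hc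
      · rcases List.mem_cons.1 hc with h | h
        · exact h ▸ pv_digitChar_mem _ (Nat.mod_lt _ (by norm_num))
        · exact hacc _ h
      · refine ih _ _ ?_ _ hc
        intro d hd
        rcases List.mem_cons.1 hd with h | h
        · exact h ▸ pv_digitChar_mem _ (Nat.mod_lt _ (by norm_num))
        · exact hacc _ h

lemma pv_toChars_mem (f : Int) (hf : 0 ≤ f) :
    ∀ c ∈ PySem.Int.toChars f, c ∈ pvDIGITS := by
  unfold PySem.Int.toChars
  rw [if_neg (by omega)]
  exact pv_toDigitsCore_mem _ _ _ (by simp)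

lemma pv_digitVal_zero_iff (c : Char) (hc : c ∈ pvDIGITS) :
    (pvDigitVal c = 0) ↔ c = '0' := by
  fin_cases hc <;> simp [pvDigitVal] <;> decide

def pvDropTrail (cs : List Char) : List Char := (cs.reverse.dropWhile (· == '0')).reverse
def pvTrailCount (cs : List Char) : Nat := (cs.reverse.takeWhile (· == '0')).length

lemma pv_decomp (cs : List Char) :
    cs = pvDropTrail cs ++ List.replicate (pvTrailCount cs) '0' := by
  have h := List.takeWhile_append_dropWhile (p := (· == '0')) (l := cs.reverse)
  have hrep : cs.reverse.takeWhile (· == '0') = List.replicate (pvTrailCount cs) '0' := by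
    apply List.eq_replicate_of_mem
    intro b hb
    have := List.mem_takeWhile_imp hb
    simpa using this
  calc cs = cs.reverse.reverse := by simp
    _ = (cs.reverse.takeWhile (· == '0') ++ cs.reverse.dropWhile (· == '0')).reverse := by rw [h]
    _ = pvDropTrail cs ++ List.replicate (pvTrailCount cs) '0' := by
        rw [List.reverse_append, hrep]
        simp [pvDropTrail]

lemma pv_trail_append_zero (cs : List Char) :
    pvDropTrail (cs ++ ['0']) = pvDropTrail cs ∧ pvTrailCount (cs ++ ['0']) = pvTrailCount cs + 1 := by
  constructor <;> simp [pvDropTrail, pvTrailCount]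

lemma pv_trail_append_nz (cs : List Char) (c : Char) (hc : c ≠ '0') :
    pvDropTrail (cs ++ [c]) = cs ++ [c] ∧ pvTrailCount (cs ++ [c]) = 0 := by
  constructor <;> simp [pvDropTrail, pvTrailCount, hc]

lemma pv_foldA (cs : List Char) (h : ∀ c ∈ cs, c ∈ pvDIGITS) :
    cs.foldl pvStepA ("", 0) =
      (String.ofList (pvDropTrail cs), pvTrailCount cs) := by
  induction cs using List.reverseRecOn with
  | nil => decide
  | append_singleton cs c ih =>
      have hcs : ∀ d ∈ cs, d ∈ pvDIGITS := fun d hd => h d (List.mem_append_left _ hd)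
      have hc : c ∈ pvDIGITS := h c (by simp)
      rw [List.foldl_append, ih hcs]
      by_cases hz : pvDigitVal c = 0
      · have hc0 : c = '0' := (pv_digitVal_zero_iff c hc).1 hz
        subst hc0
        obtain ⟨h1, h2⟩ := pv_trail_append_zero cs
        simp [pvStepA, hz, h1, h2]
      · have hc0 : c ≠ '0' := fun e => hz ((pv_digitVal_zero_iff c hc).2 e)
        obtain ⟨h1, h2⟩ := pv_trail_append_nz cs c hc0
        have hstep : List.foldl pvStepA (String.ofList (pvDropTrail cs), pvTrailCount cs) [c]
            = (String.ofList (pvDropTrail cs) ++ String.ofList (List.replicate (pvTrailCount cs) '0')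
                ++ String.ofList [c], 0) := by
          simp [pvStepA, hz]
        rw [hstep, h1, h2]
        refine Prod.ext ?_ rfl
        apply String.toList_inj.mp
        simp only [String.toList_append, String.toList_ofList]
        rw [← pv_decomp cs]

lemma pv_len_dropTrail (cs : List Char) :
    cs.length - (pvDropTrail cs).length = pvTrailCount cs := by
  have h := congrArg List.length (pv_decomp cs)
  simp at h
  omega

-- ===== VERDICT (by name: the statement is the Claim_ definition above) =====
theorem float_to_e_spec : Claim_equal_float_to_e := by
  intro f _ hpre
  unfold Spec_float_to_e float_to_e float_to_e_alt
  simp only [PySem.Str.len]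
  have hlist : (PySem.Int.toStr f).toList = PySem.Int.toChars f := PySem.Int.toList_toStr f
  set cs := PySem.Int.toChars f with hcs
  have hd : ∀ c ∈ cs, c ∈ pvDIGITS := pv_toChars_mem f hpre
  rw [hlist]
  rw [PySem.List.foldl_pyRange_zero_pyGetD' cs ' ' pvStepA ("", 0)]
  rw [pv_foldA cs hd]
  simp only [String.toList_ofList]
  rw [show (cs.reverse.dropWhile (· == '0')).reverse = pvDropTrail cs from rfl,
      pv_len_dropTrail cs]
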